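-- pv_equiv track=rewrite | github.com/p-anant/Python-DSA | Arrays/sumOfInfinityNum.py | sumOfInfinityArray
-- ===== SOURCE A (Python) =====
-- def sumOfInfinityArray(arr, n, queries, q):
--
--     mod = 10**9 + 7
--
--     #  It stores answer for each query.
--     ans = []
--
--     # Traversing the given queries
--     for ranges in queries:
--         # Substract 1 from both L and R to use it as 0-based indexing
--         l = ranges[0] - 1
--         r = ranges[1] - 1
--
--         # It stores the sum
--         sume = 0
--
--         for i in range(l, r + 1):
--             index = (i % n)
--             sume = (sume + arr[index]) % mod
--
--         sume %= mod
--         # Add answer to each query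
--         ans.append(sume)
--
--     return ans
-- ===== SOURCE B (Python) =====
-- def sumOfInfinityArray(arr, n, queries, q):
--     mod = 10**9 + 7
--
--     # prefix sums of one period: pre[k] = arr[0] + ... + arr[k-1]
--     pre = [0]
--     s = 0
--     for v in arr[:n]:
--         s += v
--         pre.append(s)
--     total = s                # sum of one full period
--
--     # S(x) = sum of the infinite periodic array's entries at indices 0..x-1
--     def S(x):
--         return (x // n) * total + pre[x % n]
--
--     ans = []
--     for ranges in queries:
--         lo = ranges[0] - 1   # 0-based inclusive left end
--         hi = ranges[1]       # 0-based exclusive right end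
--         ans.append(0 if hi <= lo else (S(hi) - S(lo)) % mod)
--     return ans
-- ===== Notes on version B (the rewrite author's own statement) =====
-- stated objective: faster
-- what changed: B precomputes the prefix sums of one period once, then answers each query in O(1) by a closed formula S(x) = (x//n)*period_sum + pre[x%n], instead of A's element-by-element loop over every query range.
-- outside the precondition, e.g. on sumOfInfinityArray([1, 2], -2, [[1, 2]], 1): A returns [3], B returns [0]; on sumOfInfinityArray([1, 2, 3], 5, [[1, 2]], 1): A returns [3], B returns [3]
import Mathlib
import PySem

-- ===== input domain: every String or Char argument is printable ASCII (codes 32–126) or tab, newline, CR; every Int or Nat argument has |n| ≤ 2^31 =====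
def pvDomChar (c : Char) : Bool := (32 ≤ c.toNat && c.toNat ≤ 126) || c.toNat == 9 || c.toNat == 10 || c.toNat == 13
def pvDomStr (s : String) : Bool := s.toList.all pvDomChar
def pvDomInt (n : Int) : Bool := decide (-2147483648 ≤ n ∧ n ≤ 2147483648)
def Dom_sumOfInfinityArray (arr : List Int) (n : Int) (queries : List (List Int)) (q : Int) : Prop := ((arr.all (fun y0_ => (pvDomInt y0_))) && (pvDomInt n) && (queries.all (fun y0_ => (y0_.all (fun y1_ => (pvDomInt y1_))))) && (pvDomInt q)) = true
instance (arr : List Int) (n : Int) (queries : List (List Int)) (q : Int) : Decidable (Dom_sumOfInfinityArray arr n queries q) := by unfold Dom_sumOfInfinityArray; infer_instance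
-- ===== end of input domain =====

-- B replaces A's element-by-element walk over each query range (O(range length) per query)
-- by a closed prefix-sum formula: full periods via multiplication plus two partial-period
-- prefix sums (O(n) per query, independent of the range length). Objective: faster.

-- ===== PORT A =====
def sumOfInfinityArray (arr : List Int) (n : Int) (queries : List (List Int)) (q : Int) : List Int :=
  let md : Int := 10 ^ 9 + 7
  queries.foldl (fun ans ranges =>
    let l := PySem.List.pyGetD ranges 0 0 - 1
    let r := PySem.List.pyGetD ranges 1 0 - 1
    let sume := (PySem.List.pyRange l (r + 1) 1).foldl
      (fun sume i => PySem.Int.mod (sume + PySem.List.pyGetD arr (PySem.Int.mod i n) 0) md) 0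
    ans ++ [PySem.Int.mod sume md]) []

-- ===== PORT B =====
-- S(x) of Source B: sum of the infinite periodic array's entries at indices 0..x-1,
-- read off the precomputed prefix-sum list of one period
def pvAltS (pre : List Int) (n total x : Int) : Int :=
  PySem.Int.floordiv x n * total + PySem.List.pyGetD pre (PySem.Int.mod x n) 0

def sumOfInfinityArray_alt (arr : List Int) (n : Int) (queries : List (List Int)) (q : Int) : List Int :=
  let md : Int := 10 ^ 9 + 7
  let ps := (PySem.List.slice arr none (some n)).foldl
    (fun st v => (st.1 ++ [st.2 + v], st.2 + v)) (([0] : List Int), (0 : Int))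
  let pre := ps.1
  let total := ps.2
  queries.foldl (fun ans ranges =>
    let lo := PySem.List.pyGetD ranges 0 0 - 1
    let hi := PySem.List.pyGetD ranges 1 0
    ans ++ [if hi ≤ lo then 0
            else PySem.Int.mod (pvAltS pre n total hi - pvAltS pre n total lo) md]) []

-- ===== PRECONDITION & SPEC =====
-- Pre_ excludes inputs where A raises (a query shorter than 2, n = 0 with a nonempty range,
-- or an index i % n that falls outside arr), and — because those are accidents of A's
-- implementation — inputs where A only returns thanks to Python's negative-index wraparound
-- (n < 0) or thanks to every touched index i % n happening to stay below len(arr) although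
-- n > len(arr); when every query range is empty no element is ever indexed, so any n is allowed.
def Pre_sumOfInfinityArray (arr : List Int) (n : Int) (queries : List (List Int)) (q : Int) : Prop :=
  (∀ rq ∈ queries, 2 ≤ rq.length) ∧
  ((1 ≤ n ∧ n ≤ arr.length) ∨ (∀ rq ∈ queries, PySem.List.pyGetD rq 1 0 < PySem.List.pyGetD rq 0 0))
instance (arr : List Int) (n : Int) (queries : List (List Int)) (q : Int) : Decidable (Pre_sumOfInfinityArray arr n queries q) := by unfold Pre_sumOfInfinityArray; infer_instance

def pvWitness_sumOfInfinityArray : List Int × Int × List (List Int) × Int := ([1, 2], 2, [[1, 5]], 1)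

def Spec_sumOfInfinityArray (arr : List Int) (n : Int) (queries : List (List Int)) (q : Int) (out : List Int) : Prop := out = sumOfInfinityArray_alt arr n queries q
instance (arr : List Int) (n : Int) (queries : List (List Int)) (q : Int) (out : List Int) : Decidable (Spec_sumOfInfinityArray arr n queries q out) := by unfold Spec_sumOfInfinityArray; infer_instance

-- ===== CLAIM (what is proved, stated in full; the proofs are below) =====
def Claim_equal_sumOfInfinityArray : Prop := ∀ (arr : List Int) (n : Int) (queries : List (List Int)) (q : Int), Dom_sumOfInfinityArray arr n queries q → Pre_sumOfInfinityArray arr n queries q → Spec_sumOfInfinityArray arr n queries q (sumOfInfinityArray arr n queries q)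

-- ===== LEMMAS AND PROOFS =====

-- the mod-accumulating fold of A is the plain sum taken mod once
theorem pv_modfold (md : Int) (hmd : 0 < md) (g : Int → Int) :
    ∀ (L : List Int) (s : Int),
      L.foldl (fun s i => PySem.Int.mod (s + g i) md) (PySem.Int.mod s md)
        = PySem.Int.mod (s + (L.map g).sum) md := by
  intro L
  induction L with
  | nil => intro s; simp
  | cons a t ih =>
    intro s
    simp only [List.foldl_cons, List.map_cons, List.sum_cons]
    have h1 : PySem.Int.mod (PySem.Int.mod s md + g a) md = PySem.Int.mod (s + g a) md := by
      simp only [PySem.Int.mod_eq_emod_of_pos hmd]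
      conv_rhs => rw [Int.add_emod]
      rw [Int.add_emod (s % md), Int.emod_emod_of_dvd _ (dvd_refl md)]
    rw [h1, ih (s + g a), add_assoc]

-- A's inner loop started at 0
theorem pv_modfold0 (md : Int) (hmd : 0 < md) (g : Int → Int) (L : List Int) :
    L.foldl (fun s i => PySem.Int.mod (s + g i) md) 0
      = PySem.Int.mod ((L.map g).sum) md := by
  have h0 : PySem.Int.mod 0 md = 0 := by
    simp [PySem.Int.mod_eq_emod_of_pos hmd]
  have := pv_modfold md hmd g L 0
  rw [h0] at this
  simpa using this

-- proof-side closed form of S(x), stated directly on arr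
def pvS (arr : List Int) (n x : Int) : Int :=
  (x / n) * (arr.take n.toNat).sum + (arr.take (x % n).toNat).sum

-- the prefix list built by B's first loop is the list of partial sums
theorem pv_pre_spec (t : List Int) :
    t.foldl (fun st v => (st.1 ++ [st.2 + v], st.2 + v)) (([0] : List Int), (0 : Int))
      = ((List.range (t.length + 1)).map (fun k => (t.take k).sum), t.sum) := by
  induction t using List.reverseRecOn with
  | nil => simp
  | append_singleton s v ih =>
    rw [List.foldl_append, ih]
    simp only [List.foldl_cons, List.foldl_nil]
    have hrs2 : List.range ((s ++ [v]).length + 1)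
        = List.range (s.length + 1) ++ [s.length + 1] := by
      simp [List.range_succ]
    rw [hrs2, List.map_append, List.map_cons, List.map_nil]
    congr 1
    congr 1
    · apply List.map_congr_left
      intro k hk
      rw [List.mem_range] at hk
      rw [List.take_append_of_le_length (by omega)]
    · simp
    · simp
-- B's table-lookup S agrees with the closed form pvS
theorem pv_altS_eq (arr : List Int) (n : Int) (hn : 1 ≤ n) (hlen : n ≤ arr.length) (x : Int) :
    pvAltS ((PySem.List.slice arr none (some n)).foldl
        (fun st v => (st.1 ++ [st.2 + v], st.2 + v)) (([0] : List Int), (0 : Int))).1 n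
      ((PySem.List.slice arr none (some n)).foldl
        (fun st v => (st.1 ++ [st.2 + v], st.2 + v)) (([0] : List Int), (0 : Int))).2 x
      = pvS arr n x := by
  have hpos : (0 : Int) < n := by omega
  have hm0 : 0 ≤ PySem.Int.mod x n := PySem.Int.mod_nonneg x hpos
  have hmlt : PySem.Int.mod x n < n := PySem.Int.mod_lt x hpos
  have ht : PySem.List.slice arr none (some n) = arr.take n.toNat :=
    PySem.List.slice_to arr (by omega)
  have htl : (arr.take n.toNat).length = n.toNat := by
    rw [List.length_take]; omega
  have htake : ∀ (k : Nat), k ≤ n.toNat →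
      ((arr.take n.toNat).take k).sum = (arr.take k).sum := by
    intro k hk
    rw [List.take_take, min_eq_left hk]
  rw [ht, pv_pre_spec, htl]
  have hmid : PySem.List.pyGetD
      ((List.range (n.toNat + 1)).map (fun k => ((arr.take n.toNat).take k).sum))
      (PySem.Int.mod x n) 0 = (arr.take (PySem.Int.mod x n).toNat).sum := by
    have hcast : PySem.Int.mod x n = (((PySem.Int.mod x n).toNat : Nat) : Int) := by omega
    rw [hcast, PySem.List.pyGetD_natCast]
    rw [List.getD_eq_getElem?_getD, List.getElem?_map,
        List.getElem?_range (by omega : (PySem.Int.mod x n).toNat < n.toNat + 1)]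
    simp only [Option.map_some, Option.getD_some]
    exact htake _ (by omega)
  unfold pvAltS pvS
  rw [hmid, PySem.Int.floordiv_eq_ediv_of_pos hpos, PySem.Int.mod_eq_emod_of_pos hpos]

-- S(x+1) = S(x) + arr[x % n]
theorem pv_S_succ (arr : List Int) (n : Int) (hn : 1 ≤ n) (hlen : n ≤ arr.length) (x : Int) :
    pvS arr n (x + 1) = pvS arr n x + PySem.List.pyGetD arr (PySem.Int.mod x n) 0 := by
  have hpos : (0 : Int) < n := by omega
  have hne : n ≠ 0 := by omega
  have hm0 : 0 ≤ PySem.Int.mod x n := PySem.Int.mod_nonneg x hpos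
  have hmlt : PySem.Int.mod x n < n := PySem.Int.mod_lt x hpos
  unfold pvS
  simp only [PySem.Int.mod_eq_emod_of_pos hpos] at *
  set m := x % n with hm
  set d := x / n with hd
  have hx : n * d + m = x := by
    have := Int.emod_add_mul_ediv x n
    linarith
  have hget : PySem.List.pyGetD arr m 0 = arr[m.toNat]'(by omega) :=
    PySem.List.pyGetD_eq_getElem arr 0 hm0 (by exact_mod_cast (by omega : m < (arr.length : Int)))
  by_cases hc : m + 1 = n
  · -- wraps to a new full period
    have h2 : x + 1 = 0 + n * (d + 1) := by linarith
    have hdiv : (x + 1) / n = d + 1 := by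
      rw [h2, Int.add_mul_ediv_left 0 (d + 1) hne]
      simp
    have hmod : (x + 1) % n = 0 := by
      rw [h2, Int.add_mul_emod_self_left]
      simp
    rw [hdiv, hmod, hget]
    have hnt : n.toNat = m.toNat + 1 := by omega
    have htot : (arr.take n.toNat).sum = (arr.take m.toNat).sum + arr[m.toNat]'(by omega) := by
      rw [hnt, List.sum_take_succ _ _ (by omega)]
    rw [htot]
    simp
    ring
  · -- stays inside the current period
    have h2 : x + 1 = (m + 1) + n * d := by linarith
    have hdiv : (x + 1) / n = d := by
      rw [h2, Int.add_mul_ediv_left (m + 1) d hne, Int.ediv_eq_zero_of_lt (by omega) (by omega)]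
      ring
    have hmod : (x + 1) % n = m + 1 := by
      rw [h2, Int.add_mul_emod_self_left, Int.emod_eq_of_lt (by omega) (by omega)]
    rw [hdiv, hmod, hget]
    have hmt : (m + 1).toNat = m.toNat + 1 := by omega
    rw [hmt, List.sum_take_succ _ _ (by omega)]
    ring

-- telescoping: the raw sum over [a, b) equals S(b) - S(a)
theorem pv_telescope (arr : List Int) (n : Int) (hn : 1 ≤ n) (hlen : n ≤ arr.length) :
    ∀ (k : Nat) (a b : Int), a ≤ b → (b - a).toNat = k →
      ((PySem.List.pyRange a b 1).map
          (fun i => PySem.List.pyGetD arr (PySem.Int.mod i n) 0)).sum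
        = pvS arr n b - pvS arr n a := by
  intro k
  induction k with
  | zero =>
    intro a b hab hk
    have : a = b := by omega
    subst this
    rw [PySem.List.pyRange_one_eq_nil le_rfl]
    simp
  | succ k ih =>
    intro a b hab hk
    have hlt : a < b := by omega
    rw [PySem.List.pyRange_one_cons hlt]
    simp only [List.map_cons, List.sum_cons]
    rw [ih (a + 1) b (by omega) (by omega)]
    have := pv_S_succ arr n hn hlen a
    omega

-- a fold appending one element per input is a map
theorem pv_fold_is_map {α β : Type} (f : α → β) :
    ∀ (L : List α) (acc : List β),
      L.foldl (fun ans x => ans ++ [f x]) acc = acc ++ L.map f := by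
  intro L
  induction L with
  | nil => simp
  | cons a t ih => intro acc; simp [ih]

-- ===== VERDICT (by name: the statement is the Claim_ definition above) =====
theorem sumOfInfinityArray_spec : Claim_equal_sumOfInfinityArray := by
  intro arr n queries q _hdom hpre
  obtain ⟨hlen2, hside⟩ := hpre
  unfold Spec_sumOfInfinityArray sumOfInfinityArray sumOfInfinityArray_alt
  simp only []
  rw [pv_fold_is_map, pv_fold_is_map]
  simp only [List.nil_append]
  apply List.map_congr_left
  intro rq hrq
  set lo := PySem.List.pyGetD rq 0 0 - 1 with hlo
  set hi := PySem.List.pyGetD rq 1 0 with hhi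
  have hmd : (0 : Int) < 10 ^ 9 + 7 := by norm_num
  have hr1 : PySem.List.pyGetD rq 1 0 - 1 + 1 = hi := by omega
  by_cases hcase : hi ≤ lo
  · -- empty range: both give 0
    rw [if_pos hcase, hr1, PySem.List.pyRange_one_eq_nil hcase]
    simp only [List.foldl_nil, PySem.Int.mod_eq_emod_of_pos hmd, Int.zero_emod]
  · -- nonempty range: n is a valid period length here
    have hn : 1 ≤ n ∧ n ≤ arr.length := by
      rcases hside with h | h
      · exact h
      · exact absurd (h rq hrq) (by omega)
    rw [if_neg hcase, hr1]
    rw [pv_modfold0 _ hmd (fun i => PySem.List.pyGetD arr (PySem.Int.mod i n) 0)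
        (PySem.List.pyRange lo hi 1)]
    rw [pv_altS_eq arr n hn.1 hn.2 hi, pv_altS_eq arr n hn.1 hn.2 lo]
    rw [pv_telescope arr n hn.1 hn.2 (hi - lo).toNat lo hi (by omega) rfl]
    simp only [PySem.Int.mod_eq_emod_of_pos hmd]
    rw [Int.emod_emod_of_dvd _ (dvd_refl _)]
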